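-- pv_equiv track=rewrite | github.com/mlei06/Clinical-Deidentification-Playground | src/clinical_deid/eval/risk.py | hipaa_coverage_report
-- ===== SOURCE A (Python) =====
-- LABEL_TO_HIPAA: dict[str, list[int]] = {
--     # #1 — Names
--     "NAME": [1],
--     "PATIENT": [1],
--     "DOCTOR": [1],
--     "STAFF": [1],
--     "HCW": [1],
--     "PERSON": [1],
--     "HOSPITAL": [1, 18],
--     "ORGANIZATION": [1, 18],
--     # #2 — Geographic data smaller than state
--     "LOCATION": [2],
--     "ADDRESS": [2],
--     "CITY": [2],
--     "STATE": [2],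
--     "COUNTRY": [2],
--     "ZIP": [2],
--     "ZIP_CODE": [2],
--     "POSTAL_CODE": [2],
--     # #3 — Dates (and ages > 89)
--     "DATE": [3],
--     "DATE_TIME": [3],
--     "AGE": [3],
--     # #4-5 — Phone / Fax
--     "PHONE": [4],
--     "FAX": [5],
--     # #6 — Email
--     "EMAIL": [6],
--     # #7 — SSN (and equivalents)
--     "SSN": [7],
--     "SIN": [7],
--     # #8 — MRN
--     "MRN": [8],
--     # #9-11, 18 — Beneficiary / Account / License / Other unique
--     "OHIP": [9],
--     "ACCOUNT": [10],
--     "LICENSE": [11],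
--     "ID": [8, 9, 10, 11, 18],
--     "IDNUM": [18],
--     # #12-13 — Vehicle / Device
--     "VEHICLE_ID": [12],
--     "DEVICE_ID": [13],
--     # #14-15 — Web / IP
--     "URL": [14],
--     "IP_ADDRESS": [15],
--     # #16 — Biometric
--     "BIOMETRIC": [16],
-- }
--
-- def hipaa_coverage_report(
--     pipeline_labels: set[str],
--     label_to_hipaa: dict[str, list[int]] | None = None,
-- ) -> dict[int, str]:
--     """Return ``{hipaa_id: status}`` where status is ``covered``, ``partial``, or ``uncovered``.
--
--     Identifier 17 (full-face photographs) is always ``n/a`` for text-only systems.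
--     """
--     mapping = label_to_hipaa or LABEL_TO_HIPAA
--
--     # Build reverse map: hipaa_id → set of labels that cover it
--     hipaa_to_labels: dict[int, set[str]] = {}
--     for label, ids in mapping.items():
--         for hid in ids:
--             hipaa_to_labels.setdefault(hid, set()).add(label)
--
--     report: dict[int, str] = {}
--     for hid in range(1, 19):
--         if hid == 17:
--             report[hid] = "n/a"
--             continue
--         covering_labels = hipaa_to_labels.get(hid, set())
--         if not covering_labels:
--             report[hid] = "uncovered"
--         elif covering_labels & pipeline_labels:
--             # At least one label covering this HIPAA ID is in the pipeline
--             if covering_labels <= pipeline_labels: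
--                 report[hid] = "covered"
--             else:
--                 report[hid] = "partial"
--         else:
--             report[hid] = "uncovered"
--
--     return report
-- ===== SOURCE B (Python) =====
-- LABEL_TO_HIPAA: dict[str, list[int]] = {
--     "NAME": [1], "PATIENT": [1], "DOCTOR": [1], "STAFF": [1], "HCW": [1],
--     "PERSON": [1], "HOSPITAL": [1, 18], "ORGANIZATION": [1, 18],
--     "LOCATION": [2], "ADDRESS": [2], "CITY": [2], "STATE": [2],
--     "COUNTRY": [2], "ZIP": [2], "ZIP_CODE": [2], "POSTAL_CODE": [2],
--     "DATE": [3], "DATE_TIME": [3], "AGE": [3],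
--     "PHONE": [4], "FAX": [5], "EMAIL": [6], "SSN": [7], "SIN": [7],
--     "MRN": [8], "OHIP": [9], "ACCOUNT": [10], "LICENSE": [11],
--     "ID": [8, 9, 10, 11, 18], "IDNUM": [18],
--     "VEHICLE_ID": [12], "DEVICE_ID": [13], "URL": [14], "IP_ADDRESS": [15],
--     "BIOMETRIC": [16],
-- }
--
--
-- def hipaa_coverage_report(
--     pipeline_labels: set[str],
--     label_to_hipaa: dict[str, list[int]] | None = None,
-- ) -> dict[int, str]:
--     """Same report as A, but computed per HIPAA id by direct counting scans
--     over the mapping: no reverse index and no set algebra are built at all."""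
--     items = list((label_to_hipaa or LABEL_TO_HIPAA).items())
--
--     def status(hid: int) -> str:
--         if hid == 17:
--             return "n/a"
--         total = sum(1 for _label, ids in items if hid in ids)
--         covered = sum(1 for label, ids in items
--                       if hid in ids and label in pipeline_labels)
--         if covered == 0:
--             return "uncovered"
--         if covered == total:
--             return "covered"
--         return "partial"
--
--     return {hid: status(hid) for hid in range(1, 19)}
-- ===== Notes on version B (the rewrite author's own statement) =====
-- stated objective: alternative
-- what changed: Drops A's reverse hipaa_id->set-of-labels index and its set intersection/subset tests entirely: B classifies each HIPAA id by two direct counting scans over the mapping items (how many labels mention the id, how many of those are in the pipeline) and compares the counts.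
import Mathlib
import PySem

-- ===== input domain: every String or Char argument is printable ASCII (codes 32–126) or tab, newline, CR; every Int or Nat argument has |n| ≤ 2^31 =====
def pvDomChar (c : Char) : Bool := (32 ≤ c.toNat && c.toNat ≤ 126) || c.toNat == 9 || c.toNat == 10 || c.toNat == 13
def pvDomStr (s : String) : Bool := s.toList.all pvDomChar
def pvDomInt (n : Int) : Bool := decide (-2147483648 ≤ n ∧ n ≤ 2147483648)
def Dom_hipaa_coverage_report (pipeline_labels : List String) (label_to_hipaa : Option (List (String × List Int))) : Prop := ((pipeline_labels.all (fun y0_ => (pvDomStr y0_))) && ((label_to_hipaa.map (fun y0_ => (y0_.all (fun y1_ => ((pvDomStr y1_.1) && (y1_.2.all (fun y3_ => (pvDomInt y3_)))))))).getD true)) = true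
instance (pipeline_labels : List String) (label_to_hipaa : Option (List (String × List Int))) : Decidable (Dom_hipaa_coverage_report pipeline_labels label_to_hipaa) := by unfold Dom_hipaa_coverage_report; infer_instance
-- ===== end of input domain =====

-- B drops A's reverse hipaa_id → set-of-labels index (set intersection/subset tests) and instead
-- classifies each HIPAA id by two direct counting scans over the mapping; same return value everywhere.

-- ===== PORT A =====

-- module constant LABEL_TO_HIPAA (shared by both ports, like the Python module constant)
def pvLABEL_TO_HIPAA : List (String × List Int) :=
  [("NAME", [1]), ("PATIENT", [1]), ("DOCTOR", [1]), ("STAFF", [1]), ("HCW", [1]),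
   ("PERSON", [1]), ("HOSPITAL", [1, 18]), ("ORGANIZATION", [1, 18]),
   ("LOCATION", [2]), ("ADDRESS", [2]), ("CITY", [2]), ("STATE", [2]),
   ("COUNTRY", [2]), ("ZIP", [2]), ("ZIP_CODE", [2]), ("POSTAL_CODE", [2]),
   ("DATE", [3]), ("DATE_TIME", [3]), ("AGE", [3]),
   ("PHONE", [4]), ("FAX", [5]), ("EMAIL", [6]), ("SSN", [7]), ("SIN", [7]),
   ("MRN", [8]), ("OHIP", [9]), ("ACCOUNT", [10]), ("LICENSE", [11]),
   ("ID", [8, 9, 10, 11, 18]), ("IDNUM", [18]),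
   ("VEHICLE_ID", [12]), ("DEVICE_ID", [13]), ("URL", [14]), ("IP_ADDRESS", [15]),
   ("BIOMETRIC", [16])]

-- `mapping = label_to_hipaa or LABEL_TO_HIPAA` (an empty dict is falsy)
def pvMappingA (label_to_hipaa : Option (List (String × List Int))) : PySem.Dict String (List Int) :=
  match label_to_hipaa with
  | none => PySem.Dict.ofList pvLABEL_TO_HIPAA
  | some l =>
    let d := PySem.Dict.ofList l
    if d.size = 0 then PySem.Dict.ofList pvLABEL_TO_HIPAA else d

-- `for label, ids in mapping.items(): for hid in ids: hipaa_to_labels.setdefault(hid, set()).add(label)`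
def pvReverseMap (items : List (String × List Int)) : PySem.Dict Int (PySem.Set String) :=
  items.foldl
    (fun d p => p.2.foldl
      (fun d hid => PySem.Dict.modify d hid PySem.Set.empty (fun s => PySem.Set.add s p.1)) d)
    PySem.Dict.empty

-- A's per-hid branch body (hid ≠ 17): the string assigned to report[hid]
def pvStatusA (P : PySem.Set String) (hipaaToLabels : PySem.Dict Int (PySem.Set String)) (hid : Int) : String :=
  let cov := PySem.Dict.getD hipaaToLabels hid PySem.Set.empty
  if cov = [] then "uncovered"
  else if PySem.Set.inter cov P ≠ [] then
    (if PySem.Set.issubset cov P then "covered" else "partial")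
  else "uncovered"

def hipaa_coverage_report (pipeline_labels : List String) (label_to_hipaa : Option (List (String × List Int))) : List (Int × String) :=
  let P : PySem.Set String := PySem.Set.ofList pipeline_labels
  let mapping := pvMappingA label_to_hipaa
  let hipaaToLabels := pvReverseMap mapping.items
  let report : PySem.Dict Int String :=
    (PySem.List.pyRange 1 19 1).foldl
      (fun rep hid =>
        if hid = 17 then PySem.Dict.insert rep hid "n/a"
        else PySem.Dict.insert rep hid (pvStatusA P hipaaToLabels hid))
      PySem.Dict.empty
  report.items

-- ===== PORT B =====

-- B's `status(hid)` helper: two counting scans over the mapping items, counts compared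
def pvStatusB (items : List (String × List Int)) (P : PySem.Set String) (hid : Int) : String :=
  if hid = 17 then "n/a"
  else
    let total := items.countP (fun p => p.2.contains hid)
    let covered := items.countP (fun p => p.2.contains hid && PySem.Set.contains P p.1)
    if covered = 0 then "uncovered"
    else if covered = total then "covered"
    else "partial"

-- `items = list((label_to_hipaa or LABEL_TO_HIPAA).items())` then a dict comprehension over range(1, 19)
def hipaa_coverage_report_alt (pipeline_labels : List String) (label_to_hipaa : Option (List (String × List Int))) : List (Int × String) :=
  let items :=
    (match label_to_hipaa with
     | none => PySem.Dict.ofList pvLABEL_TO_HIPAA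
     | some l =>
       let d := PySem.Dict.ofList l
       if d.size = 0 then PySem.Dict.ofList pvLABEL_TO_HIPAA else d).items
  (PySem.List.pyRange 1 19 1).map
    (fun hid => (hid, pvStatusB items (PySem.Set.ofList pipeline_labels) hid))

-- ===== PRECONDITION & SPEC =====
def Spec_hipaa_coverage_report (pipeline_labels : List String) (label_to_hipaa : Option (List (String × List Int))) (out : List (Int × String)) : Prop := out = hipaa_coverage_report_alt pipeline_labels label_to_hipaa
instance (pipeline_labels : List String) (label_to_hipaa : Option (List (String × List Int))) (out : List (Int × String)) : Decidable (Spec_hipaa_coverage_report pipeline_labels label_to_hipaa out) := by unfold Spec_hipaa_coverage_report; infer_instance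

-- ===== CLAIM =====
def Claim_equal_hipaa_coverage_report : Prop := ∀ (pipeline_labels : List String) (label_to_hipaa : Option (List (String × List Int))), Dom_hipaa_coverage_report pipeline_labels label_to_hipaa → Spec_hipaa_coverage_report pipeline_labels label_to_hipaa (hipaa_coverage_report pipeline_labels label_to_hipaa)

-- ===== LEMMAS AND PROOFS =====

-- A-side: membership in the reverse-map set at hid
theorem pv_mem_inner (l : String) (ids : List Int) (d : PySem.Dict Int (PySem.Set String)) (hid : Int) (x : String) :
    x ∈ PySem.Dict.getD (ids.foldl (fun d h => PySem.Dict.modify d h PySem.Set.empty (fun s => PySem.Set.add s l)) d) hid PySem.Set.empty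
    ↔ x ∈ PySem.Dict.getD d hid PySem.Set.empty ∨ (hid ∈ ids ∧ x = l) := by
  induction ids generalizing d with
  | nil => simp
  | cons h t ih =>
    simp only [List.foldl_cons, ih, PySem.Dict.getD_modify, List.mem_cons]
    by_cases hh : hid = h
    · subst hh
      rw [if_pos rfl]
      simp only [PySem.Set.mem_add]
      tauto
    · rw [if_neg hh]
      tauto

theorem pv_mem_reverse (items : List (String × List Int)) (d : PySem.Dict Int (PySem.Set String)) (hid : Int) (x : String) :
    x ∈ PySem.Dict.getD (items.foldl (fun d p => p.2.foldl (fun d h => PySem.Dict.modify d h PySem.Set.empty (fun s => PySem.Set.add s p.1)) d) d) hid PySem.Set.empty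
    ↔ x ∈ PySem.Dict.getD d hid PySem.Set.empty ∨ ∃ p ∈ items, p.1 = x ∧ hid ∈ p.2 := by
  induction items generalizing d with
  | nil => simp
  | cons p t ih =>
    simp only [List.foldl_cons, ih, pv_mem_inner, List.mem_cons]
    constructor
    · rintro (((h | ⟨h1, h2⟩) | ⟨q, hq, h1, h2⟩))
      · exact Or.inl h
      · exact Or.inr ⟨p, Or.inl rfl, h2.symm, h1⟩
      · exact Or.inr ⟨q, Or.inr hq, h1, h2⟩
    · rintro (h | ⟨q, (rfl | hq), h1, h2⟩)
      · exact Or.inl (Or.inl h)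
      · exact Or.inl (Or.inr ⟨h2, h1.symm⟩)
      · exact Or.inr ⟨q, hq, h1, h2⟩

theorem pv_mem_reverseMap (items : List (String × List Int)) (hid : Int) (x : String) :
    x ∈ PySem.Dict.getD (pvReverseMap items) hid PySem.Set.empty
    ↔ ∃ p ∈ items, p.1 = x ∧ hid ∈ p.2 := by
  unfold pvReverseMap
  rw [pv_mem_reverse]
  simp [PySem.Set.empty]

-- B-side: `covered = total` means every mapping entry mentioning hid has its label in P
theorem pv_countP_and_eq_iff {α : Type} (l : List α) (f g : α → Bool) :
    l.countP (fun x => f x && g x) = l.countP f ↔ ∀ x ∈ l, f x → g x := by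
  induction l with
  | nil => simp
  | cons a t ih =>
    have hle : t.countP (fun x => f x && g x) ≤ t.countP f :=
      List.countP_mono_left (fun x _ hx => by simp_all)
    by_cases hf : f a = true
    · by_cases hg : g a = true
      · simp only [List.countP_cons, hf, hg, Bool.and_self, if_true, List.mem_cons]
        constructor
        · intro h x hx hfx
          rcases hx with rfl | hx
          · exact hg
          · exact ih.mp (by omega) x hx hfx
        · intro h
          have := ih.mpr (fun x hx => h x (Or.inr hx))
          omega
      · have hgf : g a = false := by simpa using hg
        simp only [List.countP_cons, hf, hgf, Bool.and_false, if_true, List.mem_cons]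
        constructor
        · intro h
          exfalso
          simp only [Bool.false_eq_true, if_false] at h
          omega
        · intro h
          exact absurd (h a (Or.inl rfl) hf) (by simp [hgf])
    · have hff : f a = false := by simpa using hf
      simp only [List.countP_cons, hff, Bool.false_and, Bool.false_eq_true, if_false,
        List.mem_cons, Nat.add_zero]
      constructor
      · intro h x hx hfx
        rcases hx with rfl | hx
        · exact absurd hfx (by simp [hff])
        · exact ih.mp h x hx hfx
      · intro h
        exact ih.mpr (fun x hx => h x (Or.inr hx))

-- per-hid equality of A's branch body and B's status helper (any hid ≠ 17)
theorem pv_status_eq (P : PySem.Set String) (items : List (String × List Int)) (hid : Int) (h17 : hid ≠ 17) :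
    pvStatusA P (pvReverseMap items) hid = pvStatusB items P hid := by
  have hmem := fun x => pv_mem_reverseMap items hid x
  have hcov0 : items.countP (fun p => p.2.contains hid && PySem.Set.contains P p.1) = 0
      ↔ ∀ p ∈ items, ¬ (hid ∈ p.2 ∧ p.1 ∈ P) := by
    rw [List.countP_eq_zero]
    constructor
    · intro h p hp ⟨hm, hP⟩
      exact h p hp (by simp_all)
    · intro h p hp
      have := h p hp
      simp only [Bool.and_eq_true, List.contains_iff_mem, PySem.Set.contains_eq_listContains] at *
      tauto
  have hcovT : items.countP (fun p => p.2.contains hid && PySem.Set.contains P p.1)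
        = items.countP (fun p => p.2.contains hid)
      ↔ ∀ p ∈ items, hid ∈ p.2 → p.1 ∈ P := by
    have := pv_countP_and_eq_iff items (fun p => p.2.contains hid) (fun p => PySem.Set.contains P p.1)
    simpa using this
  unfold pvStatusA pvStatusB
  rw [if_neg h17]
  set S : PySem.Set String := PySem.Dict.getD (pvReverseMap items) hid PySem.Set.empty with hS
  by_cases hnil : S = []
  · rw [if_pos hnil]
    have hcz : items.countP (fun p => p.2.contains hid && PySem.Set.contains P p.1) = 0 := by
      rw [hcov0]
      intro p hp ⟨hm, _⟩
      have hx : p.1 ∈ S := (hmem p.1).mpr ⟨p, hp, rfl, hm⟩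
      rw [hnil] at hx
      exact (List.not_mem_nil) hx
    rw [if_pos hcz]
  · rw [if_neg hnil]
    by_cases hint : PySem.Set.inter S P = []
    · rw [if_neg (not_not_intro hint)]
      have hcz : items.countP (fun p => p.2.contains hid && PySem.Set.contains P p.1) = 0 := by
        rw [hcov0]
        intro p hp ⟨hm, hP⟩
        have hx : p.1 ∈ PySem.Set.inter S P :=
          (PySem.Set.mem_inter _ _ _).mpr ⟨(hmem p.1).mpr ⟨p, hp, rfl, hm⟩, hP⟩
        rw [hint] at hx
        exact (List.not_mem_nil) hx
      rw [if_pos hcz]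
    · rw [if_pos hint]
      rcases List.exists_mem_of_ne_nil _ hint with ⟨x, hx⟩
      rw [PySem.Set.mem_inter] at hx
      rcases hx with ⟨hx1, hx2⟩
      rcases (hmem x).mp hx1 with ⟨p, hp, hpx, hpm⟩
      have hcnz : items.countP (fun q => q.2.contains hid && PySem.Set.contains P q.1) ≠ 0 := by
        intro h
        exact hcov0.mp h p hp ⟨hpm, hpx ▸ hx2⟩
      rw [if_neg hcnz]
      by_cases hsub : PySem.Set.issubset S P = true
      · rw [if_pos hsub]
        have hct := hcovT.mpr (fun q hq hqm =>
          (PySem.Set.issubset_iff _ _).mp hsub q.1 ((hmem q.1).mpr ⟨q, hq, rfl, hqm⟩))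
        rw [if_pos hct]
      · rw [if_neg hsub]
        have hnct : ¬ (items.countP (fun q => q.2.contains hid && PySem.Set.contains P q.1)
            = items.countP (fun q => q.2.contains hid)) := by
          intro h
          apply hsub
          rw [PySem.Set.issubset_iff]
          intro y hy
          rcases (hmem y).mp hy with ⟨q, hq, hqy, hqm⟩
          exact hqy ▸ hcovT.mp h q hq hqm
        rw [if_neg hnct]

-- A's report loop inserts the 18 distinct fresh keys 1..18 into an empty dict: items = a map
theorem pv_report_items (f : Int → String) :
    ((PySem.List.pyRange 1 19 1).foldl
      (fun rep hid =>
        if hid = 17 then PySem.Dict.insert rep hid "n/a"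
        else PySem.Dict.insert rep hid (f hid))
      (PySem.Dict.empty : PySem.Dict Int String)).items
    = (PySem.List.pyRange 1 19 1).map (fun hid => (hid, if hid = 17 then "n/a" else f hid)) := by
  have hfun : (fun (rep : PySem.Dict Int String) (hid : Int) =>
        if hid = 17 then PySem.Dict.insert rep hid "n/a"
        else PySem.Dict.insert rep hid (f hid))
      = (fun rep hid => PySem.Dict.insert rep hid (if hid = 17 then "n/a" else f hid)) := by
    funext rep hid
    by_cases h : hid = 17 <;> simp [h]
  rw [hfun]
  have h := PySem.Dict.items_foldl_insert_fresh (PySem.List.pyRange 1 19 1)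
    (fun hid => hid) (fun hid => if hid = 17 then "n/a" else f hid)
    (PySem.Dict.empty : PySem.Dict Int String) (by intro a _; rfl) (by decide)
  simpa using h

-- ===== VERDICT (by name: the statement is the Claim_ definition above) =====
theorem hipaa_coverage_report_spec : Claim_equal_hipaa_coverage_report := by
  intro pipeline_labels label_to_hipaa _
  unfold Spec_hipaa_coverage_report
  show ((PySem.List.pyRange 1 19 1).foldl
      (fun rep hid =>
        if hid = 17 then PySem.Dict.insert rep hid "n/a"
        else PySem.Dict.insert rep hid
          (pvStatusA (PySem.Set.ofList pipeline_labels)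
            (pvReverseMap (pvMappingA label_to_hipaa).items) hid))
      PySem.Dict.empty).items
    = hipaa_coverage_report_alt pipeline_labels label_to_hipaa
  rw [pv_report_items]
  unfold hipaa_coverage_report_alt
  apply List.map_congr_left
  intro hid _
  by_cases h17 : hid = 17
  · simp [h17, pvStatusB]
  · rw [if_neg h17, pv_status_eq _ _ _ h17]
    rfl
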